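-- pv_equiv track=rewrite | github.com/Michaszek224/praktykaiszeregowaniezadan | zadanie1/algorytmy2/155275.py | calculate_total_delay
-- ===== SOURCE A (Python) =====
-- def calc_delay(batch, p, d, start_time, setup_time, is_first=False):
--     if is_first:
--         end_time = start_time + sum(p[j] for j in batch)
--     else:
--         end_time = start_time + setup_time + sum(p[j] for j in batch)
--     delay = sum(max(0, end_time - d[j]) for j in batch)
--     return delay, end_time
--
-- def calculate_total_delay(batches, p, d, setup_time):
--     total_delay = 0
--     t = 0
--     is_first = True
--     for b in batches:
--         delay, t = calc_delay(b, p, d, t, setup_time, is_first)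
--         total_delay += delay
--         is_first = False
--     return total_delay
-- ===== SOURCE B (Python) =====
-- def calculate_total_delay(batches, p, d, setup_time):
--     # Phase 1: per-batch work, then end time of batch i = prefix work sum + i * setup_time
--     work = [sum(p[j] for j in b) for b in batches]
--     end_times = []
--     acc = 0
--     for i, w in enumerate(work):
--         acc += w
--         end_times.append(acc + i * setup_time)
--     # Phase 2: consume the end-time table
--     total = 0
--     for b, et in zip(batches, end_times):
--         total += sum(max(0, et - d[j]) for j in b)
--     return total
-- ===== Notes on version B (the rewrite author's own statement) =====
-- stated objective: alternative
-- what changed: B replaces A's single stateful loop with is_first flag and a helper returning (delay, end_time) by two separate passes: first a table of batch end times computed with the closed form i*setup_time plus a prefix sum of batch workloads, then a zip pass accumulating tardiness from that table.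
import Mathlib
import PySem

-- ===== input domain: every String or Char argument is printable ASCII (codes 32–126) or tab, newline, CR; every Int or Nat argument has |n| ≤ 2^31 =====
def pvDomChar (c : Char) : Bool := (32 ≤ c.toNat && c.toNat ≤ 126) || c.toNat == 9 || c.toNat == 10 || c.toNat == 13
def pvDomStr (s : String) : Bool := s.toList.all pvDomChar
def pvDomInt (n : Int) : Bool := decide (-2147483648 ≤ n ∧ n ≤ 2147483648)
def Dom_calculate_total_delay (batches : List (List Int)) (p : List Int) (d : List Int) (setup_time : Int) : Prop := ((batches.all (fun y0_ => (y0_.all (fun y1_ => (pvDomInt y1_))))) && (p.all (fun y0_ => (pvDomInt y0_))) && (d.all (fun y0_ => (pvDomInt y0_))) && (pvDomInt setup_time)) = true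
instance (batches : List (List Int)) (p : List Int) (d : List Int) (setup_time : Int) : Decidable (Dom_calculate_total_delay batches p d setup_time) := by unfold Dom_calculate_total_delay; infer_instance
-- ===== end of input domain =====

-- B rebuilds A's single stateful loop as two passes: a table of batch end times
-- (closed form i*setup_time + prefix work sum), then a zip pass summing tardiness (alternative decomposition, same cost).

-- ===== PORT A =====
-- sum(p[j] for j in batch); p[j] via pyGetD, exact under Pre_ (in-range indices)
def pvSumA (p : List Int) (batch : List Int) : Int :=
  batch.foldl (fun s j => s + PySem.List.pyGetD p j 0) 0

def pvCalcDelay (batch p d : List Int) (start_time setup_time : Int) (is_first : Bool) : Int × Int :=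
  let end_time := if is_first then start_time + pvSumA p batch
                  else start_time + setup_time + pvSumA p batch
  let delay := batch.foldl (fun s j => s + max 0 (end_time - PySem.List.pyGetD d j 0)) 0
  (delay, end_time)

def calculate_total_delay (batches : List (List Int)) (p : List Int) (d : List Int) (setup_time : Int) : Int :=
  (batches.foldl (fun st b =>
      let r := pvCalcDelay b p d st.2.1 setup_time st.2.2
      (st.1 + r.1, r.2, false)) ((0 : Int), (0 : Int), true)).1

-- ===== PORT B =====
-- sum(p[j] for j in b)
def pvWork (p : List Int) (b : List Int) : Int :=
  b.foldl (fun s j => s + PySem.List.pyGetD p j 0) 0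

-- the first loop of B: enumerate(work), building end_times head-first in loop order
def pvEndTimes (setup_time : Int) : List Int → Nat → Int → List Int
  | [], _, _ => []
  | w :: ws, i, acc => (acc + w + (i : Int) * setup_time) :: pvEndTimes setup_time ws (i + 1) (acc + w)

-- sum(max(0, et - d[j]) for j in b)
def pvTard (d : List Int) (b : List Int) (et : Int) : Int :=
  b.foldl (fun s j => s + max 0 (et - PySem.List.pyGetD d j 0)) 0

def calculate_total_delay_alt (batches : List (List Int)) (p : List Int) (d : List Int) (setup_time : Int) : Int :=
  let work := batches.map (pvWork p)
  let end_times := pvEndTimes setup_time work 0 0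
  (batches.zip end_times).foldl (fun total be => total + pvTard d be.1 be.2) 0

-- ===== PRECONDITION & SPEC =====
-- Pre_ excludes exactly the inputs where A raises IndexError: some job index out of range for p or d.
def Pre_calculate_total_delay (batches : List (List Int)) (p : List Int) (d : List Int) (setup_time : Int) : Prop :=
  ∀ b ∈ batches, ∀ j ∈ b, PySem.Raise.InRange p.length j ∧ PySem.Raise.InRange d.length j
instance (batches : List (List Int)) (p : List Int) (d : List Int) (setup_time : Int) : Decidable (Pre_calculate_total_delay batches p d setup_time) := by unfold Pre_calculate_total_delay; infer_instance

def pvWitness_calculate_total_delay : List (List Int) × List Int × List Int × Int := ([[0], [1, 0]], [3, 4], [2, 5], 1)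

def Spec_calculate_total_delay (batches : List (List Int)) (p : List Int) (d : List Int) (setup_time : Int) (out : Int) : Prop := out = calculate_total_delay_alt batches p d setup_time
instance (batches : List (List Int)) (p : List Int) (d : List Int) (setup_time : Int) (out : Int) : Decidable (Spec_calculate_total_delay batches p d setup_time out) := by unfold Spec_calculate_total_delay; infer_instance

-- ===== CLAIM (what is proved, stated in full; the proofs are below) =====
def Claim_equal_calculate_total_delay : Prop := ∀ (batches : List (List Int)) (p : List Int) (d : List Int) (setup_time : Int), Dom_calculate_total_delay batches p d setup_time → Pre_calculate_total_delay batches p d setup_time → Spec_calculate_total_delay batches p d setup_time (calculate_total_delay batches p d setup_time)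

-- ===== LEMMAS AND PROOFS =====

lemma pv_tail (p d : List Int) (setup : Int) :
    ∀ (bs : List (List Int)) (total t : Int) (i : Nat) (acc : Int),
      acc + (i : Int) * setup = t + setup →
      (bs.foldl (fun st b =>
          let r := pvCalcDelay b p d st.2.1 setup st.2.2
          (st.1 + r.1, r.2, false)) (total, t, false)).1
      = (bs.zip (pvEndTimes setup (bs.map (pvWork p)) i acc)).foldl
          (fun tot be => tot + pvTard d be.1 be.2) total := by
  intro bs
  induction bs with
  | nil => intro total t i acc h; simp [pvEndTimes]
  | cons b rest ih =>
    intro total t i acc h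
    simp only [List.map_cons, pvEndTimes, List.zip_cons_cons, List.foldl_cons]
    have hw : pvWork p b = pvSumA p b := rfl
    have he : acc + pvWork p b + (i : Int) * setup = t + setup + pvSumA p b := by
      rw [hw]; linarith
    have hd : pvCalcDelay b p d t setup false
        = (pvTard d b (acc + pvWork p b + (i : Int) * setup),
           acc + pvWork p b + (i : Int) * setup) := by
      rw [he]; simp [pvCalcDelay, pvTard]
    rw [hd]
    exact ih (total + pvTard d b (acc + pvWork p b + (i : Int) * setup))
      (acc + pvWork p b + (i : Int) * setup) (i + 1) (acc + pvWork p b)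
      (by push_cast; ring)

theorem calculate_total_delay_spec : Claim_equal_calculate_total_delay := by
  intro batches p d setup_time _ _
  unfold Spec_calculate_total_delay
  cases batches with
  | nil => rfl
  | cons b rest =>
    unfold calculate_total_delay calculate_total_delay_alt
    simp only [List.map_cons, pvEndTimes, List.zip_cons_cons, List.foldl_cons]
    rw [pv_tail p d setup_time rest ((0 : Int) + (pvCalcDelay b p d 0 setup_time true).1)
          ((pvCalcDelay b p d 0 setup_time true).2) 1 (0 + pvWork p b)
          (by simp [pvCalcDelay, pvWork, pvSumA])]
    have h1 : (pvCalcDelay b p d 0 setup_time true).1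
        = pvTard d b (0 + pvWork p b + (0 : Int) * setup_time) := by
      have hw : pvWork p b = pvSumA p b := rfl
      simp [pvCalcDelay, pvTard, hw]
    rw [h1]
    norm_num
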